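-- pv_equiv track=rewrite | github.com/matsu582/o2md | x2md_tables.py | _trim_edge_empty_columns
-- ===== SOURCE A (Python) =====
-- from typing import List, Dict, Tuple, Optional, Any, Set
--
-- def _trim_edge_empty_columns(table_data: List[List[str]]) -> List[List[str]]:
--     """先頭および末尾の完全に空の列を削除して列ずれを防止する"""
--     if not table_data:
--         return table_data
--
--     # 正規化: 各行を同じ列数に揃える
--     num_cols = max(len(row) for row in table_data)
--     for row in table_data:
--         while len(row) < num_cols:
--             row.append("")
--
--     left = 0
--     right = num_cols - 1
--
--     # 左端から最初の非空列を見つける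
--     while left <= right:
--         if any(r[left].strip() for r in table_data):
--             break
--         left += 1
--
--     # 右端から最後の非空列を見つける
--     while right >= left:
--         if any(r[right].strip() for r in table_data):
--             break
--         right -= 1
--
--     # 少なくとも2列は保持する（既存の方針に合わせる）
--     if right - left + 1 < 2 and num_cols >= 2:
--         left = 0
--         right = min(1, num_cols - 1)
--
--     # スライスして新しいテーブルを返す
--     new_table = []
--     for r in table_data:
--         new_table.append(r[left:right+1])
--
--     return new_table
-- ===== SOURCE B (Python) =====
-- from typing import List
--
-- def _trim_edge_empty_columns(table_data: List[List[str]]) -> List[List[str]]: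
--     """Single-pass column scan instead of two early-stopping while loops."""
--     if not table_data:
--         return table_data
--
--     # normalization: pad each row in place to the same width (same as A)
--     num_cols = max(len(row) for row in table_data)
--     for row in table_data:
--         while len(row) < num_cols:
--             row.append("")
--
--     # indices of all non-empty columns, computed once
--     nonempty = [j for j in range(num_cols) if any(r[j].strip() for r in table_data)]
--     if nonempty:
--         left, right = nonempty[0], nonempty[-1]
--     else:
--         left, right = 0, -1
--
--     # keep at least 2 columns (same policy as A)
--     if right - left + 1 < 2 and num_cols >= 2:
--         left, right = 0, min(1, num_cols - 1)
--
--     return [r[left:right + 1] for r in table_data]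
-- ===== Notes on version B (the rewrite author's own statement) =====
-- stated objective: alternative
-- what changed: The two early-stopping while loops that scan for the first/last non-empty column are replaced by one comprehension collecting all non-empty column indices, from which left/right are read off as its first/last element.
import Mathlib
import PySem

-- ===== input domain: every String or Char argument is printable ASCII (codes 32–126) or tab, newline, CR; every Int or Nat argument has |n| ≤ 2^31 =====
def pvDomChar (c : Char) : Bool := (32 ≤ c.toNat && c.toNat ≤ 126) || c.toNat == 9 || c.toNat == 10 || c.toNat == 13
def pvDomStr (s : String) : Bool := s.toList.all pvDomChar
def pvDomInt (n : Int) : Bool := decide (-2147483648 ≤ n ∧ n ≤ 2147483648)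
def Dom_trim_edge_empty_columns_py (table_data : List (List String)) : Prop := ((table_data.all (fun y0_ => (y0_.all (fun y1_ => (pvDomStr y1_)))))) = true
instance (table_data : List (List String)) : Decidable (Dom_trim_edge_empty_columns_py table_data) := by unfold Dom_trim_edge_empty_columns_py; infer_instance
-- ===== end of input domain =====

-- B replaces A's two early-stopping edge scans by one comprehension of all non-empty column
-- indices (objective: alternative decomposition, same cost). A pads rows in place; this file
-- is about the RETURN value (the Python B performs the same in-place padding).

-- ===== PORT A =====
-- truthiness of r[j].strip(): the stripped cell is a non-empty string
def pvStrNE (s : String) : Bool := !(PySem.Str.strip s).toList.isEmpty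
-- any(r[j].strip() for r in t); rows are already padded, so index j is in range (getD "" is a totality guard)
def pvColNE (t : List (List String)) (j : Nat) : Bool := t.any (fun r => pvStrNE (r.getD j ""))
-- the in-place 'while len(row) < num_cols: row.append("")' padding loop (appends num_cols - len "" cells)
def pvPad (n : Nat) (r : List String) : List String := r ++ List.replicate (n - r.length) ""
-- shared tail of both Pythons (identical code in A and B): the 'keep at least 2 columns'
-- fallback (right = min(1, num_cols-1), i.e. r1 = min 2 numCols) and the slicing r[left:right+1];
-- r1 carries right+1 (both programs keep 0 ≤ left ≤ r1, so indices stay Nats)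
def pvFinish (padded : List (List String)) (numCols left r1 : Nat) : List (List String) :=
  let p := if r1 - left < 2 ∧ 2 ≤ numCols then ((0 : Nat), min 2 numCols) else (left, r1)
  padded.map (fun r => PySem.List.slice r (some (p.1 : Int)) (some (p.2 : Int)))

-- 'while left <= right: if col nonempty: break; left += 1' (bound = right+1)
def pvLeftLoop (t : List (List String)) (bound left : Nat) : Nat :=
  if left < bound then
    (if pvColNE t left then left else pvLeftLoop t bound (left + 1))
  else left
termination_by bound - left

-- 'while right >= left: if col nonempty: break; right -= 1', carried as r1 = right+1
def pvRightLoop (t : List (List String)) (left r1 : Nat) : Nat :=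
  if left < r1 then
    (if pvColNE t (r1 - 1) then r1 else pvRightLoop t left (r1 - 1))
  else r1
termination_by r1

def trim_edge_empty_columns_py (table_data : List (List String)) : List (List String) :=
  if table_data = [] then table_data
  else
    let numCols := ((table_data.map (fun r => r.length)).max?).getD 0   -- max(len(row) …); list nonempty here
    let padded := table_data.map (pvPad numCols)
    let left := pvLeftLoop padded numCols 0
    let r1 := pvRightLoop padded left numCols
    pvFinish padded numCols left r1

-- ===== PORT B =====
def trim_edge_empty_columns_py_alt (table_data : List (List String)) : List (List String) :=
  if table_data = [] then table_data
  else
    let numCols := ((table_data.map (fun r => r.length)).max?).getD 0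
    let padded := table_data.map (pvPad numCols)
    -- nonempty = [j for j in range(num_cols) if any(r[j].strip() for r in table_data)]
    let ne := (List.range numCols).filter (fun j => pvColNE padded j)
    let left := ne.headD 0
    -- right = nonempty[-1] if nonempty else -1, carried as r1 = right+1
    let r1 := match ne.getLast? with | some j => j + 1 | none => 0
    pvFinish padded numCols left r1

-- ===== PRECONDITION & SPEC =====
def Spec_trim_edge_empty_columns_py (table_data : List (List String)) (out : List (List String)) : Prop := out = trim_edge_empty_columns_py_alt table_data
instance (table_data : List (List String)) (out : List (List String)) : Decidable (Spec_trim_edge_empty_columns_py table_data out) := by unfold Spec_trim_edge_empty_columns_py; infer_instance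

-- ===== CLAIM (what is proved, stated in full; the proofs are below) =====
def Claim_equal_trim_edge_empty_columns_py : Prop := ∀ (table_data : List (List String)), Dom_trim_edge_empty_columns_py table_data → Spec_trim_edge_empty_columns_py table_data (trim_edge_empty_columns_py table_data)

-- ===== LEMMAS AND PROOFS =====

-- A's left scan returns the first non-empty column index in [left, bound), else bound
theorem pvLeftLoop_eq (t : List (List String)) (bound left : Nat) (h : left ≤ bound) :
    pvLeftLoop t bound left =
      (((List.range' left (bound - left)).filter (fun j => pvColNE t j)).headD bound) := by
  fun_induction pvLeftLoop t bound left with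
  | case1 left hlt hP =>
      have : bound - left = (bound - (left+1)) + 1 := by omega
      rw [this, List.range'_succ]
      simp [hP]
  | case2 left hlt hP ih =>
      have : bound - left = (bound - (left+1)) + 1 := by omega
      rw [this, List.range'_succ]
      simp only [List.filter_cons, hP]
      exact ih (by omega)
  | case3 left hlt =>
      have : left = bound := by omega
      subst this
      simp

-- A's right scan returns (last non-empty column index in [left, r1)) + 1, else left
theorem pvRightLoop_eq (t : List (List String)) (left r1 : Nat) (h : left ≤ r1) :
    pvRightLoop t left r1 =
      (match ((List.range' left (r1 - left)).filter (fun j => pvColNE t j)).getLast? with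
       | some j => j + 1
       | none => left) := by
  fun_induction pvRightLoop t left r1 with
  | case1 r1 hlt hP =>
      have h1 : r1 - left = (r1 - 1 - left) + 1 := by omega
      rw [h1, List.range'_1_concat]
      have h2 : left + (r1 - 1 - left) = r1 - 1 := by omega
      rw [h2, List.filter_append]
      have h0 : 0 < r1 := by omega
      simp [hP]
      exact (Nat.succ_pred_eq_of_pos h0).symm
  | case2 r1 hlt hP ih =>
      have h1 : r1 - left = (r1 - 1 - left) + 1 := by omega
      rw [h1, List.range'_1_concat]
      have h2 : left + (r1 - 1 - left) = r1 - 1 := by omega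
      rw [h2, List.filter_append]
      simp [hP]
      rw [ih (by omega)]
      simp
  | case3 r1 hlt =>
      have : r1 = left := by omega
      subst this
      simp

-- the two scans and the comprehension feed pvFinish the same result
theorem pvKey (padded : List (List String)) (numCols : Nat) :
    pvFinish padded numCols (pvLeftLoop padded numCols 0)
      (pvRightLoop padded (pvLeftLoop padded numCols 0) numCols)
    = pvFinish padded numCols
        (((List.range numCols).filter (fun j => pvColNE padded j)).headD 0)
        (match ((List.range numCols).filter (fun j => pvColNE padded j)).getLast? with
         | some j => j + 1 | none => 0) := by
  have hL := pvLeftLoop_eq padded numCols 0 (Nat.zero_le _)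
  rw [Nat.sub_zero, ← List.range_eq_range'] at hL
  cases hF : (List.range numCols).filter (fun j => pvColNE padded j) with
  | nil =>
      rw [hF] at hL
      simp at hL
      rw [hL]
      rw [pvRightLoop_eq padded numCols numCols (le_refl _)]
      simp only [Nat.sub_self, List.range'_zero, List.filter_nil, List.getLast?_nil]
      by_cases h2 : 2 ≤ numCols
      · simp [pvFinish, h2]
      · simp [pvFinish, h2, PySem.List.slice_natCast, PySem.List.slice_to]
  | cons j0 rest =>
      rw [hF] at hL
      simp only [List.headD_cons] at hL
      have hj0 : j0 ∈ (List.range numCols).filter (fun j => pvColNE padded j) := by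
        rw [hF]; exact List.mem_cons_self
      have hj0lt : j0 < numCols := List.mem_range.mp (List.mem_filter.mp hj0).1
      rw [hL, pvRightLoop_eq padded j0 numCols (le_of_lt hj0lt)]
      have hsplit : List.range numCols = List.range' 0 j0 ++ List.range' j0 (numCols - j0) := by
        have h : List.range' 0 (j0 + (numCols - j0)) = List.range' 0 j0 ++ List.range' (0 + j0) (numCols - j0) :=
          (List.range'_append_1).symm
        rw [Nat.zero_add, Nat.add_sub_cancel' hj0lt.le] at h
        rw [List.range_eq_range']
        exact h
      have hfront : (List.range' 0 j0).filter (fun j => pvColNE padded j) = [] := by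
        cases hp1 : (List.range' 0 j0).filter (fun j => pvColNE padded j) with
        | nil => rfl
        | cons y ys =>
            exfalso
            have : (List.range numCols).filter (fun j => pvColNE padded j)
                = y :: (ys ++ (List.range' j0 (numCols - j0)).filter (fun j => pvColNE padded j)) := by
              rw [hsplit, List.filter_append, hp1]; rfl
            rw [hF] at this
            have hy : y ∈ (List.range' 0 j0).filter (fun j => pvColNE padded j) := by
              rw [hp1]; exact List.mem_cons_self
            have hylt : y < j0 := by
              have := (List.mem_filter.mp hy).1
              have := List.mem_range'_1.mp this
              omega
            have : j0 = y := by injection this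
            omega
      have hback : (List.range' j0 (numCols - j0)).filter (fun j => pvColNE padded j) = j0 :: rest := by
        have := hF
        rw [hsplit, List.filter_append, hfront, List.nil_append] at this
        exact this
      rw [hback]
      cases hGL : (j0 :: rest).getLast? with
      | none => simp at hGL
      | some jm => rfl

-- ===== VERDICT (by name: the statement is the Claim_ definition above) =====
theorem trim_edge_empty_columns_py_spec : Claim_equal_trim_edge_empty_columns_py := by
  intro td _
  unfold Spec_trim_edge_empty_columns_py
  by_cases h : td = []
  · simp [trim_edge_empty_columns_py, trim_edge_empty_columns_py_alt, h]
  · simp only [trim_edge_empty_columns_py, trim_edge_empty_columns_py_alt, if_neg h]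
    exact pvKey _ _
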